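-- pv_equiv track=rewrite | github.com/nicolafan/wikiextractor | new.py | extract_image_and_caption
-- ===== SOURCE A (Python) =====
-- def extract_image_and_caption(infobox):
--     fields = [field.strip() for field in infobox.split("\n")]
--     fields = [field[1:].strip() if (field and field[0] == "|") else "" for field in fields]
--     image = None
--     caption = None
--
--     for field in fields:
--         if field.startswith("image"):
--             image = field.split("=", 1)[-1].strip()
--         elif field.startswith("caption"):
--             caption = field.split("=", 1)[-1].strip()
--
--     if not image:
--         return None, None
--     return image, caption
-- ===== SOURCE B (Python) =====
-- def extract_image_and_caption(infobox):
--     fields = [field.strip() for field in infobox.split("\n")]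
--     fields = [field[1:].strip() if (field and field[0] == "|") else "" for field in fields]
--     image = next((f.split("=", 1)[-1].strip() for f in reversed(fields) if f.startswith("image")), None)
--     if not image:
--         return None, None
--     caption = next((f.split("=", 1)[-1].strip() for f in reversed(fields) if f.startswith("caption")), None)
--     return image, caption
-- ===== Notes on version B (the rewrite author's own statement) =====
-- stated objective: simpler
-- what changed: Replaces the single stateful loop carrying (image, caption) with two independent reversed-iteration searches (next over a generator), each finding the last matching field directly, and skips the caption search entirely when image is missing/empty.
import Mathlib
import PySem

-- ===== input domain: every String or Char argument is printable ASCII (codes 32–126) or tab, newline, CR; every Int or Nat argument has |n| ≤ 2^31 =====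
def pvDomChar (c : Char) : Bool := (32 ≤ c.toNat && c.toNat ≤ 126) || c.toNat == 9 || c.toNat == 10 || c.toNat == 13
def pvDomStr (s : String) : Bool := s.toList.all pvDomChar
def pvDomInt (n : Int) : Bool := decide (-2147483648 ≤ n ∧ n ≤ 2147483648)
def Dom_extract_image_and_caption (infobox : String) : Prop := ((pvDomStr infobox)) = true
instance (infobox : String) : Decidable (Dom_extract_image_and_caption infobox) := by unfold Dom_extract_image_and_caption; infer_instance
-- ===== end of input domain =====

-- B replaces A's single stateful loop by two independent reversed-iteration searches (simpler decomposition; same cost).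

-- shared helpers: both Pythons contain these identical expressions
-- field.split("=", 1)[-1].strip();  split always returns a nonempty list, so [-1] is exact via pyGetD
def eicVal (field : String) : String :=
  PySem.Str.strip (PySem.List.pyGetD ((PySem.Str.splitMax? field "=" 1).getD []) (-1) "")

-- the two list comprehensions building `fields` (identical lines in Source A and Source B)
def eicFields (infobox : String) : List String :=
  (((PySem.Str.split? infobox "\n").getD []).map PySem.Str.strip).map (fun field =>
    if field ≠ "" ∧ PySem.Str.pyGet? field 0 = some '|' then
      PySem.Str.strip (PySem.Str.slice field (some 1) none)
    else "")

-- ===== PORT A =====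
def extract_image_and_caption (infobox : String) : Option String × Option String :=
  let fields := eicFields infobox
  let st := fields.foldl (fun (st : Option String × Option String) field =>
    if PySem.Str.startswith field "image" then (some (eicVal field), st.2)
    else if PySem.Str.startswith field "caption" then (st.1, some (eicVal field))
    else st) (none, none)
  match st.1 with
  | none => (none, none)                    -- if not image (None)
  | some s => if s = "" then (none, none)   -- if not image (empty string)
              else (some s, st.2)

-- ===== PORT B =====
def extract_image_and_caption_alt (infobox : String) : Option String × Option String :=
  let fields := eicFields infobox
  let image := fields.reverse.findSome? (fun f =>
    if PySem.Str.startswith f "image" then some (eicVal f) else none)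
  match image with
  | none => (none, none)
  | some s => if s = "" then (none, none)
              else (some s, fields.reverse.findSome? (fun f =>
                if PySem.Str.startswith f "caption" then some (eicVal f) else none))

-- ===== PRECONDITION & SPEC =====
def Spec_extract_image_and_caption (infobox : String) (out : Option String × Option String) : Prop := out = extract_image_and_caption_alt infobox
instance (infobox : String) (out : Option String × Option String) : Decidable (Spec_extract_image_and_caption infobox out) := by unfold Spec_extract_image_and_caption; infer_instance

-- ===== CLAIM (what is proved, stated in full; the proofs are below) =====
def Claim_equal_extract_image_and_caption : Prop := ∀ (infobox : String), Dom_extract_image_and_caption infobox → Spec_extract_image_and_caption infobox (extract_image_and_caption infobox)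

-- ===== LEMMAS AND PROOFS =====

def eicStep (st : Option String × Option String) (field : String) : Option String × Option String :=
  if PySem.Str.startswith field "image" then (some (eicVal field), st.2)
  else if PySem.Str.startswith field "caption" then (st.1, some (eicVal field))
  else st

lemma image_not_caption (l : List Char)
    (h : PySem.Chars.startswith l ['i','m','a','g','e'] = true) :
    PySem.Chars.startswith l ['c','a','p','t','i','o','n'] = false := by
  rw [PySem.Chars.startswith_iff] at h
  by_contra hc
  rw [Bool.not_eq_false, PySem.Chars.startswith_iff] at hc
  obtain ⟨r, hr⟩ := h
  obtain ⟨r', hr'⟩ := hc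
  rw [← hr'] at hr
  simp at hr

lemma eicLoop_fst (fields : List String) (a c : Option String) :
    (fields.foldl eicStep (a, c)).1 =
      ((fields.reverse.findSome? (fun f =>
        if PySem.Str.startswith f "image" then some (eicVal f) else none)).orElse (fun _ => a)) := by
  induction fields generalizing a c with
  | nil => simp
  | cons f rest ih =>
    rw [List.foldl_cons,
      show eicStep (a, c) f = ((eicStep (a, c) f).1, (eicStep (a, c) f).2) from rfl, ih]
    rw [List.reverse_cons, List.findSome?_append]
    cases hrv : rest.reverse.findSome? (fun f =>
        if PySem.Str.startswith f "image" then some (eicVal f) else none) with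
    | some x => simp [Option.orElse]
    | none =>
      simp only [Option.orElse, eicStep]
      split_ifs with h1 h2 <;> simp_all [List.findSome?]

lemma eicLoop_snd (fields : List String) (a c : Option String) :
    (fields.foldl eicStep (a, c)).2 =
      ((fields.reverse.findSome? (fun f =>
        if PySem.Str.startswith f "caption" then some (eicVal f) else none)).orElse (fun _ => c)) := by
  induction fields generalizing a c with
  | nil => simp
  | cons f rest ih =>
    rw [List.foldl_cons,
      show eicStep (a, c) f = ((eicStep (a, c) f).1, (eicStep (a, c) f).2) from rfl, ih]
    rw [List.reverse_cons, List.findSome?_append]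
    cases hrv : rest.reverse.findSome? (fun f =>
        if PySem.Str.startswith f "caption" then some (eicVal f) else none) with
    | some x => simp [Option.orElse]
    | none =>
      simp only [Option.orElse, eicStep]
      split_ifs with h1 h2
      · have hc := image_not_caption f.toList (by simpa using h1)
        simp_all [List.findSome?]
      · simp_all [List.findSome?]
      · simp_all [List.findSome?]

-- ===== VERDICT (by name: the statement is the Claim_ definition above) =====
theorem extract_image_and_caption_spec : Claim_equal_extract_image_and_caption := by
  intro infobox _
  unfold Spec_extract_image_and_caption extract_image_and_caption extract_image_and_caption_alt
  have hf := eicLoop_fst (eicFields infobox) none none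
  have hs := eicLoop_snd (eicFields infobox) none none
  simp only [show (fun (st : Option String × Option String) field =>
      if PySem.Str.startswith field "image" then (some (eicVal field), st.2)
      else if PySem.Str.startswith field "caption" then (st.1, some (eicVal field))
      else st) = eicStep from rfl] at *
  rw [hf, hs]
  rcases (eicFields infobox).reverse.findSome? (fun f =>
      if PySem.Str.startswith f "image" then some (eicVal f) else none) with _ | x <;>
    rcases (eicFields infobox).reverse.findSome? (fun f =>
      if PySem.Str.startswith f "caption" then some (eicVal f) else none) with _ | y <;>
    simp [Option.orElse]
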